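-- pv_equiv track=rewrite | github.com/atulpunde/basic_intermediate_level_python | numberSum.py | check_registration_number
-- ===== SOURCE A (Python) =====
-- def check_registration_number(reg_number):
--     temp=reg_number
--     result_sum=0
--     flag=True
--     while(flag):
--         while(temp>0):
--             rem=temp%10
--             result_sum+=rem
--             temp=temp//10
--         if(result_sum>=9):
--             result=True
--             break
--         elif(result_sum>9):
--             temp=result_sum
--             result_sum=1
--         else:
--             result=False
--             break
--     return result
-- ===== SOURCE B (Python) =====
-- def check_registration_number(reg_number):
--     if reg_number < 0:
--         return False
--     return sum(int(c) for c in str(reg_number)) >= 9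
-- ===== Notes on version B (the rewrite author's own statement) =====
-- stated objective: idiomatic
-- what changed: replaces A's remainder-and-quotient arithmetic digit-extraction loop wrapped in a redundant outer while/flag loop with a single sum of int(c) over the decimal string str(reg_number), guarding negatives (which A treats as digitless) up front
import Mathlib
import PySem

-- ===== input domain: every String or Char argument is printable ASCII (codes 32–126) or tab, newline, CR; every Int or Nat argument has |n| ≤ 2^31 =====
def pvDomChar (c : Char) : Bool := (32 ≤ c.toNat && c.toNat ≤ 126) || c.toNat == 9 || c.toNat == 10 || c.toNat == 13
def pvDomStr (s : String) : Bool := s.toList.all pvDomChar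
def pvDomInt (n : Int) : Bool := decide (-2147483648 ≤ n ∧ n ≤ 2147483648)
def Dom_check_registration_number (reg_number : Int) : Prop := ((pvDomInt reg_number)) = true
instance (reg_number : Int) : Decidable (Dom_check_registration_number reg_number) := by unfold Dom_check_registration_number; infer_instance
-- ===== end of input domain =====

-- B swaps A's remainder/quotient arithmetic digit extraction inside a redundant outer while/flag loop for summing int(c) over the decimal string; idiomatic, same cost. --

-- ===== PORT A =====
-- inner 'while(temp>0)' loop: state (temp, result_sum)
def pvInnerA (temp result_sum : Int) : Int :=
  if temp > 0 then
    pvInnerA (PySem.Int.floordiv temp 10) (result_sum + PySem.Int.mod temp 10)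
  else result_sum
termination_by temp.toNat
decreasing_by
  rw [PySem.Int.floordiv_eq_ediv_of_pos (by omega)]; omega

-- outer 'while(flag)' loop: runs the inner loop, then the if/elif/else chain.
-- The elif branch (result_sum>9 after ¬result_sum>=9) is unreachable; Lean sees
-- that in decreasing_by, so the recursion terminates.
def pvOuterA (temp result_sum : Int) : Bool :=
  let s := pvInnerA temp result_sum
  if _h1 : s ≥ 9 then true
  else if _h2 : s > 9 then pvOuterA s 1
  else false
termination_by 0
decreasing_by omega

def check_registration_number (reg_number : Int) : Bool :=
  pvOuterA reg_number 0

-- ===== PORT B =====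
-- int(c) ported as c.toNat - 48: exact on the digit characters of str(n), n ≥ 0
def check_registration_number_alt (reg_number : Int) : Bool :=
  if reg_number < 0 then false
  else decide (((PySem.Int.toChars reg_number).map (fun c => (c.toNat : Int) - 48)).sum ≥ 9)

-- ===== PRECONDITION & SPEC =====
def Spec_check_registration_number (reg_number : Int) (out : Bool) : Prop := out = check_registration_number_alt reg_number
instance (reg_number : Int) (out : Bool) : Decidable (Spec_check_registration_number reg_number out) := by unfold Spec_check_registration_number; infer_instance

-- ===== CLAIM (what is proved, stated in full; the proofs are below) =====
def Claim_equal_check_registration_number : Prop := ∀ (reg_number : Int), Dom_check_registration_number reg_number → Spec_check_registration_number reg_number (check_registration_number reg_number)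

-- ===== LEMMAS AND PROOFS =====

-- arithmetic digit sum of a natural number (proof-only helper)
def pvDigitSum (n : Nat) : Int :=
  if n = 0 then 0 else ((n % 10 : Nat) : Int) + pvDigitSum (n / 10)

-- value of a digit character, as B's port computes it
def pvVal (c : Char) : Int := (c.toNat : Int) - 48

theorem pvVal_digitChar (d : Nat) (h : d < 10) : pvVal (Nat.digitChar d) = (d : Int) := by
  revert h; revert d; decide

theorem pvInnerA_eq_nat (n : Nat) : ∀ (s : Int), pvInnerA (n : Int) s = s + pvDigitSum n := by
  induction n using Nat.strong_induction_on with
  | _ n ih =>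
    intro s
    rw [pvInnerA]
    by_cases hz : n = 0
    · subst hz; simp [pvDigitSum]
    · have hpos : (n : Int) > 0 := by exact_mod_cast Nat.pos_of_ne_zero hz
      rw [if_pos hpos]
      rw [show ((10 : Int)) = ((10 : Nat) : Int) from rfl]
      rw [PySem.Int.floordiv_natCast, PySem.Int.mod_natCast]
      rw [ih (n / 10) (Nat.div_lt_self (Nat.pos_of_ne_zero hz) (by omega))]
      rw [show pvDigitSum n = ((n % 10 : Nat) : Int) + pvDigitSum (n / 10) from by
        rw [pvDigitSum, if_neg hz]]
      ring

theorem pvInnerA_eq (t : Int) (ht : 0 ≤ t) (s : Int) :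
    pvInnerA t s = s + pvDigitSum t.toNat := by
  have h : t = (t.toNat : Int) := by omega
  rw [h]; exact pvInnerA_eq_nat t.toNat s

theorem pvCore_sum (fuel : Nat) : ∀ (n : Nat) (ds : List Char), n < fuel →
    ((Nat.toDigitsCore 10 fuel n ds).map pvVal).sum = pvDigitSum n + ((ds.map pvVal).sum) := by
  induction fuel with
  | zero => intro n ds h; omega
  | succ fuel ih =>
    intro n ds h
    rw [Nat.toDigitsCore]
    by_cases h0 : n / 10 = 0
    · simp only [h0, if_true]
      have hn : n < 10 := by omega
      by_cases hz : n = 0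
      · subst hz; simp [pvVal_digitChar, pvDigitSum]
      · rw [pvDigitSum, if_neg hz, h0, pvDigitSum]
        simp [pvVal_digitChar (n % 10) (by omega)]
    · simp only [h0, if_false]
      have hrec : n / 10 < fuel := by omega
      rw [ih (n / 10) _ hrec, List.map_cons, List.sum_cons]
      have hz : ¬ n = 0 := by omega
      rw [show pvDigitSum n = ((n % 10 : Nat) : Int) + pvDigitSum (n / 10) from by
        rw [pvDigitSum, if_neg hz]]
      rw [pvVal_digitChar (n % 10) (by omega)]
      ring

theorem pvToDigits_sum (n : Nat) :
    ((Nat.toDigits 10 n).map pvVal).sum = pvDigitSum n := by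
  rw [Nat.toDigits, pvCore_sum (n + 1) n [] (by omega)]
  simp

-- ===== VERDICT (by name: the statement is the Claim_ definition above) =====
theorem check_registration_number_spec : Claim_equal_check_registration_number := by
  intro reg _hd
  unfold Spec_check_registration_number check_registration_number check_registration_number_alt
  rw [pvOuterA]
  by_cases hneg : reg < 0
  · have h0 : pvInnerA reg 0 = 0 := by rw [pvInnerA]; simp; omega
    simp [h0, hneg]
  · push_neg at hneg
    have hs : pvInnerA reg 0 = pvDigitSum reg.toNat := by
      rw [pvInnerA_eq reg hneg 0]; ring
    have hb : PySem.Int.toChars reg = Nat.toDigits 10 reg.toNat := by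
      simp [PySem.Int.toChars, not_lt.mpr hneg]
    have hnn : ¬ reg < 0 := not_lt.mpr hneg
    simp only [hs, hb, hnn, if_false]
    have := pvToDigits_sum reg.toNat
    have hmap : (Nat.toDigits 10 reg.toNat).map (fun c => (c.toNat : Int) - 48)
        = (Nat.toDigits 10 reg.toNat).map pvVal := rfl
    rw [hmap, this]
    by_cases h9 : pvDigitSum reg.toNat ≥ 9
    · simp [h9]
    · simp only [dif_neg h9, decide_eq_false h9]
      split
      · next h => exact absurd (le_of_lt h) h9
      · rfl
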